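-- pv_equiv track=rewrite | github.com/LachlanBlackhall/aoc2021 | 8/2.py | check_uniques
-- ===== SOURCE A (Python) =====
-- def check_uniques(nums, current_line):
--     remaining = current_line.copy()
--     for item in current_line:
--         if len(item) == 2:
--             for char in item:
--                 nums['1'].append(char)
--             remaining.remove(item)
--         elif len(item) == 4:
--             for char in item:
--                 nums['4'].append(char)
--             remaining.remove(item)
--         elif len(item) == 3:
--             for char in item:
--                 nums['7'].append(char)
--             remaining.remove(item)
--         elif len(item) == 7:
--             for char in item:
--                 nums['8'].append(char)
--             remaining.remove(item)
--     return nums, remaining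
-- ===== SOURCE B (Python) =====
-- def check_uniques(nums, current_line):
--     mapping = {2: '1', 4: '4', 3: '7', 7: '8'}
--     remaining = []
--     for item in current_line:
--         key = mapping.get(len(item))
--         if key is None:
--             remaining.append(item)
--         else:
--             nums[key].extend(item)
--     return nums, remaining
-- ===== Notes on version B (the rewrite author's own statement) =====
-- stated objective: simpler
-- what changed: Replaces A's copy-then-list.remove scheme (and its if/elif chain with per-char appends) by a single forward pass that classifies each item via a length-to-digit mapping, extends nums[key] in one step, and builds remaining by accumulation instead of deletion.
import Mathlib
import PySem

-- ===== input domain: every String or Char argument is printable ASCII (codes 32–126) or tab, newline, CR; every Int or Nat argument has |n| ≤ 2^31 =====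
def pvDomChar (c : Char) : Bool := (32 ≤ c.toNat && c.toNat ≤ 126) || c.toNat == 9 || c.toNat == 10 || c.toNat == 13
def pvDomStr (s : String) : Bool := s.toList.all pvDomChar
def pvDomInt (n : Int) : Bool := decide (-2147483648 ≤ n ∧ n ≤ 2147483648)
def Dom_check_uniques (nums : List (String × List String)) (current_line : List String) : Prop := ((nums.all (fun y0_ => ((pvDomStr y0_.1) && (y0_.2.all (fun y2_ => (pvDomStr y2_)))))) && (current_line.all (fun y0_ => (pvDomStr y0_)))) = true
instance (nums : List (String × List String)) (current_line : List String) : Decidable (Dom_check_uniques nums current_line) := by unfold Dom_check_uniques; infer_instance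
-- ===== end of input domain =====

-- B replaces A's copy-then-remove scheme by a single forward pass that classifies each
-- item through a length→digit table and builds `remaining` by accumulation (simpler; no list.remove).
-- Python A mutates the dict `nums` in place; the equivalence proved here is about the return value.


-- ===== PORT A =====
-- nums['k'].append(x): append x to the value of the FIRST pair with key k (Python dict = assoc list,
-- first match); a missing key is a Python KeyError — excluded by Pre_, the helper is then a no-op.
def pvDictAppend (nums : List (String × List String)) (k : String) (x : String) : List (String × List String) :=
  match nums with
  | [] => []
  | (k', v) :: rest => if k' = k then (k', v ++ [x]) :: rest else (k', v) :: pvDictAppend rest k x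

-- the body of A's `for item in current_line` loop, acting on the state (nums, remaining)
def pvStepA (st : (List (String × List String)) × List String) (item : String) : (List (String × List String)) × List String :=
  if PySem.Str.len item = 2 then
    (item.toList.foldl (fun d c => pvDictAppend d "1" (String.ofList [c])) st.1,
     (PySem.List.remove? st.2 item).getD st.2)   -- remove never raises here (item was copied into remaining)
  else if PySem.Str.len item = 4 then
    (item.toList.foldl (fun d c => pvDictAppend d "4" (String.ofList [c])) st.1,
     (PySem.List.remove? st.2 item).getD st.2)
  else if PySem.Str.len item = 3 then
    (item.toList.foldl (fun d c => pvDictAppend d "7" (String.ofList [c])) st.1,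
     (PySem.List.remove? st.2 item).getD st.2)
  else if PySem.Str.len item = 7 then
    (item.toList.foldl (fun d c => pvDictAppend d "8" (String.ofList [c])) st.1,
     (PySem.List.remove? st.2 item).getD st.2)
  else st

def check_uniques (nums : List (String × List String)) (current_line : List String) : (List (String × List String)) × List String :=
  current_line.foldl pvStepA (nums, current_line)

-- ===== PORT B =====
-- mapping = {2:'1', 4:'4', 3:'7', 7:'8'}
def pvMapping : PySem.Dict Int String := PySem.Dict.ofList [(2, "1"), (4, "4"), (3, "7"), (7, "8")]

-- nums[k].extend(item): extend the value of the FIRST pair with key k by item's chars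
def pvDictExtend (nums : List (String × List String)) (k : String) (xs : List String) : List (String × List String) :=
  match nums with
  | [] => []
  | (k', v) :: rest => if k' = k then (k', v ++ xs) :: rest else (k', v) :: pvDictExtend rest k xs

-- the body of B's loop
def pvStepB (st : (List (String × List String)) × List String) (item : String) : (List (String × List String)) × List String :=
  match pvMapping.get? (PySem.Str.len item) with
  | none => (st.1, st.2 ++ [item])
  | some k => (pvDictExtend st.1 k (item.toList.map (fun c => String.ofList [c])), st.2)

def check_uniques_alt (nums : List (String × List String)) (current_line : List String) : (List (String × List String)) × List String :=
  current_line.foldl pvStepB (nums, [])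

-- ===== PRECONDITION & SPEC =====
-- Pre_ excludes exactly the inputs on which Python A raises KeyError: a current_line item of
-- length 2/4/3/7 whose digit key '1'/'4'/'7'/'8' is missing from nums (B raises there too).
def Pre_check_uniques (nums : List (String × List String)) (current_line : List String) : Prop :=
  (current_line.any (fun s => PySem.Str.len s == 2) = true → "1" ∈ nums.map Prod.fst) ∧
  (current_line.any (fun s => PySem.Str.len s == 4) = true → "4" ∈ nums.map Prod.fst) ∧
  (current_line.any (fun s => PySem.Str.len s == 3) = true → "7" ∈ nums.map Prod.fst) ∧
  (current_line.any (fun s => PySem.Str.len s == 7) = true → "8" ∈ nums.map Prod.fst)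
instance (nums : List (String × List String)) (current_line : List String) : Decidable (Pre_check_uniques nums current_line) := by unfold Pre_check_uniques; infer_instance

def pvWitness_check_uniques : (List (String × List String)) × List String :=
  ([("1", []), ("4", []), ("7", []), ("8", [])], ["ab", "abc", "abcde"])

def Spec_check_uniques (nums : List (String × List String)) (current_line : List String) (out : (List (String × List String)) × List String) : Prop := out = check_uniques_alt nums current_line
instance (nums : List (String × List String)) (current_line : List String) (out : (List (String × List String)) × List String) : Decidable (Spec_check_uniques nums current_line out) := by unfold Spec_check_uniques; infer_instance

-- ===== CLAIM (what is proved, stated in full; the proofs are below) =====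
def Claim_equal_check_uniques : Prop := ∀ (nums : List (String × List String)) (current_line : List String), Dom_check_uniques nums current_line → Pre_check_uniques nums current_line → Spec_check_uniques nums current_line (check_uniques nums current_line)

-- ===== LEMMAS AND PROOFS =====

-- the length→digit table, evaluated
theorem pvMapping_get? (n : Int) :
    pvMapping.get? n = if n = 2 then some "1" else if n = 4 then some "4"
      else if n = 3 then some "7" else if n = 7 then some "8" else none := by
  have h : pvMapping = PySem.Dict.mk [(2, "1"), (4, "4"), (3, "7"), (7, "8")] := by rfl
  rw [h]
  simp only [PySem.Dict.get?_mk_cons, beq_iff_eq]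
  by_cases e2 : n = 2 <;> by_cases e4 : n = 4 <;> by_cases e3 : n = 3 <;> by_cases e7 : n = 7 <;>
    simp_all [PySem.Dict.get?, eq_comm]

-- extend by nothing is the identity
theorem pvDictExtend_nil (d : List (String × List String)) (k : String) :
    pvDictExtend d k [] = d := by
  induction d with
  | nil => rfl
  | cons p rest ih => obtain ⟨k', v⟩ := p; by_cases h : k' = k <;> simp [pvDictExtend, h, ih]

-- extending past a fresh append is one longer extend
theorem pvDictExtend_append (d : List (String × List String)) (k x : String) (xs : List String) :
    pvDictExtend (pvDictAppend d k x) k xs = pvDictExtend d k (x :: xs) := by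
  induction d with
  | nil => rfl
  | cons p rest ih =>
    obtain ⟨k', v⟩ := p
    by_cases h : k' = k <;> simp [pvDictAppend, pvDictExtend, h, ih]

-- A's per-char append loop IS B's extend
theorem pvAppend_foldl_eq_extend (k : String) (cs : List Char) (d : List (String × List String)) :
    cs.foldl (fun d c => pvDictAppend d k (String.ofList [c])) d
      = pvDictExtend d k (cs.map (fun c => String.ofList [c])) := by
  induction cs generalizing d with
  | nil => simp [pvDictExtend_nil]
  | cons c cs ih => simp [List.foldl_cons, ih, pvDictExtend_append]

-- remove hits the head of the unprocessed suffix when the item is absent from the kept prefix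
theorem pvRemove_prefix (kept : List String) (item : String) (h : item ∉ kept) (rest : List String) :
    PySem.List.remove? (kept ++ item :: rest) item = some (kept ++ rest) := by
  induction kept with
  | nil => simp [PySem.List.remove?_cons_self]
  | cons s kept ih =>
    have hs : s ≠ item := fun hsi => h (by simp [hsi])
    have := ih (fun hm => h (List.mem_cons_of_mem _ hm))
    simp [PySem.List.remove?_cons_of_ne _ hs, this]

-- main loop invariant: A's state over the unprocessed suffix `rest`, with remaining =
-- kept ++ rest where kept holds only unclassified lengths, matches B's accumulator
theorem pvLoop_eq (rest : List String) : ∀ (kept : List String) (d : List (String × List String)),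
    (∀ s ∈ kept, pvMapping.get? (PySem.Str.len s) = none) →
    rest.foldl pvStepA (d, kept ++ rest) = rest.foldl pvStepB (d, kept) := by
  induction rest with
  | nil => intro kept d _; simp
  | cons item rest ih =>
    intro kept d hk
    by_cases h2 : PySem.Str.len item = 2
    case pos =>
      have hnotin : item ∉ kept := by
        intro hm; have hke := hk item hm; rw [pvMapping_get?, if_pos h2] at hke; cases hke
      rw [List.foldl_cons, List.foldl_cons]
      have hA : pvStepA (d, kept ++ item :: rest) item
          = (item.toList.foldl (fun d c => pvDictAppend d "1" (String.ofList [c])) d, kept ++ rest) := by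
        simp only [pvStepA]
        rw [if_pos h2, pvRemove_prefix kept item hnotin rest]; rfl
      have hB : pvStepB (d, kept) item
          = (pvDictExtend d "1" (item.toList.map (fun c => String.ofList [c])), kept) := by
        simp only [pvStepB]
        rw [pvMapping_get?, if_pos h2]
      rw [hA, hB, pvAppend_foldl_eq_extend]
      exact ih kept _ hk
    case neg =>
    by_cases h4 : PySem.Str.len item = 4
    case pos =>
      have hnotin : item ∉ kept := by
        intro hm; have hke := hk item hm; rw [pvMapping_get?, if_neg h2, if_pos h4] at hke; cases hke
      rw [List.foldl_cons, List.foldl_cons]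
      have hA : pvStepA (d, kept ++ item :: rest) item
          = (item.toList.foldl (fun d c => pvDictAppend d "4" (String.ofList [c])) d, kept ++ rest) := by
        simp only [pvStepA]
        rw [if_neg h2, if_pos h4, pvRemove_prefix kept item hnotin rest]; rfl
      have hB : pvStepB (d, kept) item
          = (pvDictExtend d "4" (item.toList.map (fun c => String.ofList [c])), kept) := by
        simp only [pvStepB]
        rw [pvMapping_get?, if_neg h2, if_pos h4]
      rw [hA, hB, pvAppend_foldl_eq_extend]
      exact ih kept _ hk
    case neg =>
    by_cases h3 : PySem.Str.len item = 3
    case pos =>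
      have hnotin : item ∉ kept := by
        intro hm; have hke := hk item hm
        rw [pvMapping_get?, if_neg h2, if_neg h4, if_pos h3] at hke; cases hke
      rw [List.foldl_cons, List.foldl_cons]
      have hA : pvStepA (d, kept ++ item :: rest) item
          = (item.toList.foldl (fun d c => pvDictAppend d "7" (String.ofList [c])) d, kept ++ rest) := by
        simp only [pvStepA]
        rw [if_neg h2, if_neg h4, if_pos h3, pvRemove_prefix kept item hnotin rest]; rfl
      have hB : pvStepB (d, kept) item
          = (pvDictExtend d "7" (item.toList.map (fun c => String.ofList [c])), kept) := by
        simp only [pvStepB]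
        rw [pvMapping_get?, if_neg h2, if_neg h4, if_pos h3]
      rw [hA, hB, pvAppend_foldl_eq_extend]
      exact ih kept _ hk
    case neg =>
    by_cases h7 : PySem.Str.len item = 7
    case pos =>
      have hnotin : item ∉ kept := by
        intro hm; have hke := hk item hm
        rw [pvMapping_get?, if_neg h2, if_neg h4, if_neg h3, if_pos h7] at hke; cases hke
      rw [List.foldl_cons, List.foldl_cons]
      have hA : pvStepA (d, kept ++ item :: rest) item
          = (item.toList.foldl (fun d c => pvDictAppend d "8" (String.ofList [c])) d, kept ++ rest) := by
        simp only [pvStepA]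
        rw [if_neg h2, if_neg h4, if_neg h3, if_pos h7, pvRemove_prefix kept item hnotin rest]; rfl
      have hB : pvStepB (d, kept) item
          = (pvDictExtend d "8" (item.toList.map (fun c => String.ofList [c])), kept) := by
        simp only [pvStepB]
        rw [pvMapping_get?, if_neg h2, if_neg h4, if_neg h3, if_pos h7]
      rw [hA, hB, pvAppend_foldl_eq_extend]
      exact ih kept _ hk
    case neg =>
      have hget : pvMapping.get? (PySem.Str.len item) = none := by
        rw [pvMapping_get?, if_neg h2, if_neg h4, if_neg h3, if_neg h7]
      have hstep : pvStepA (d, kept ++ item :: rest) item = (d, kept ++ item :: rest) := by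
        simp only [pvStepA]
        rw [if_neg h2, if_neg h4, if_neg h3, if_neg h7]
      have hstepB : pvStepB (d, kept) item = (d, kept ++ [item]) := by
        simp only [pvStepB, hget]
      have hk' : ∀ s ∈ kept ++ [item], pvMapping.get? (PySem.Str.len s) = none := by
        intro s hs
        rcases List.mem_append.mp hs with hs | hs
        · exact hk s hs
        · simp only [List.mem_singleton] at hs; subst hs; exact hget
      calc (item :: rest).foldl pvStepA (d, kept ++ item :: rest)
          = rest.foldl pvStepA (d, (kept ++ [item]) ++ rest) := by
            simp [List.foldl_cons, hstep]
        _ = rest.foldl pvStepB (d, kept ++ [item]) := ih (kept ++ [item]) d hk'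
        _ = (item :: rest).foldl pvStepB (d, kept) := by simp [List.foldl_cons, hstepB]

-- ===== VERDICT (by name: the statement is the Claim_ definition above) =====
theorem check_uniques_spec : Claim_equal_check_uniques := by
  intro nums current_line _ _
  unfold Spec_check_uniques check_uniques check_uniques_alt
  exact pvLoop_eq current_line [] nums (by simp)
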